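-- pv_equiv track=rewrite | github.com/dbschmigelski/sdk-python | src/tools/use_github.py | is_mutation_query
-- ===== SOURCE A (Python) =====
-- MUTATIVE_KEYWORDS = [
--     "create",
--     "update",
--     "delete",
--     "add",
--     "remove",
--     "merge",
--     "close",
--     "reopen",
--     "lock",
--     "unlock",
--     "pin",
--     "unpin",
--     "transfer",
--     "archive",
--     "unarchive",
--     "enable",
--     "disable",
--     "accept",
--     "decline",
--     "dismiss",
--     "submit",
--     "request",
--     "cancel",
--     "convert",
-- ]
--
-- def is_mutation_query(query: str) -> bool:
--     """Check if a GraphQL query is a mutation based on keywords and structure.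
--
--     Args:
--         query: GraphQL query string
--
--     Returns:
--         True if the query appears to be a mutation
--     """
--     query_lower = query.lower().strip()
--
--     # Check if query starts with "mutation"
--     if query_lower.startswith("mutation"):
--         return True
--
--     # For queries that start with "query", they are read-only
--     if query_lower.startswith("query"):
--         return False
--
--     # Check for mutative keywords only in root field names (not in nested fields or descriptions)
--     # This is a more conservative approach - only flag as mutation if it's
--     # clearly a mutation operation
--     lines = query_lower.split("\n")
--     for line in lines:
--         line = line.strip()
--         # Skip comments and empty lines
--         if line.startswith("#") or not line:
--             continue
--         # Look for root-level mutation operations (not nested fields)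
--         if any(
--             line.startswith(f"{keyword}(")
--             or line.startswith(f"{keyword} ")
--             or line == keyword
--             for keyword in MUTATIVE_KEYWORDS
--         ):
--             return True
--
--     return False
-- ===== SOURCE B (Python) =====
-- MUTATIVE_KEYWORDS = [
--     "create", "update", "delete", "add", "remove", "merge", "close", "reopen",
--     "lock", "unlock", "pin", "unpin", "transfer", "archive", "unarchive",
--     "enable", "disable", "accept", "decline", "dismiss", "submit", "request",
--     "cancel", "convert",
-- ]
--
-- _MUTATIVE_SET = frozenset(MUTATIVE_KEYWORDS)
--
--
-- def is_mutation_query(query: str) -> bool: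
--     q = query.lower().strip()
--     if q.startswith("mutation"):
--         return True
--     if q.startswith("query"):
--         return False
--     # staged pipeline: strip every line, collect the SET of root-field tokens
--     # (line cut at the first '(' or literal space), then one disjointness test
--     stripped = [line.strip() for line in q.split("\n")]
--     roots = {
--         line.split("(", 1)[0].split(" ", 1)[0]
--         for line in stripped
--         if line and not line.startswith("#")
--     }
--     return not _MUTATIVE_SET.isdisjoint(roots)
-- ===== Notes on version B (the rewrite author's own statement) =====
-- stated objective: alternative
-- what changed: B drops A's per-line early-return scan (three startswith tests per keyword, 24 keywords) entirely: a staged pipeline strips all lines, builds the set of root-field tokens (each line cut at the first '(' or literal space) in one comprehension, and answers with a single frozenset disjointness test.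
import Mathlib
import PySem

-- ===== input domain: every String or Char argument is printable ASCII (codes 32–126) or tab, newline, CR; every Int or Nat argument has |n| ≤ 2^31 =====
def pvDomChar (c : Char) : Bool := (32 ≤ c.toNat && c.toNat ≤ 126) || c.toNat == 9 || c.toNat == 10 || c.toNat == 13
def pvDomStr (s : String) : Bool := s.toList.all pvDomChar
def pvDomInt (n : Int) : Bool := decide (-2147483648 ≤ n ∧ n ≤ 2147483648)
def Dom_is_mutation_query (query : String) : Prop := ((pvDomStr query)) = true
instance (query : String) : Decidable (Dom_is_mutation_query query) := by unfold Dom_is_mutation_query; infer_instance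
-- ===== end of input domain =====

-- B replaces A's per-line early-return scan over 24 keywords by a staged pipeline: strip all
-- lines, build the SET of root-field tokens, then one set-disjointness test (alternative).

-- ===== PORT A =====
-- MUTATIVE_KEYWORDS, shared module constant
def pvKeywords : List (List Char) :=
  ["create".toList, "update".toList, "delete".toList, "add".toList, "remove".toList,
   "merge".toList, "close".toList, "reopen".toList, "lock".toList, "unlock".toList,
   "pin".toList, "unpin".toList, "transfer".toList, "archive".toList, "unarchive".toList,
   "enable".toList, "disable".toList, "accept".toList, "decline".toList, "dismiss".toList,
   "submit".toList, "request".toList, "cancel".toList, "convert".toList]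

-- A's 'for line in lines: …' loop with its early return
def pvALoop : List (List Char) → Bool
  | [] => false
  | l :: rest =>
    let line := PySem.Chars.strip l
    if PySem.Chars.startswith line "#".toList || line == [] then pvALoop rest
    else if pvKeywords.any (fun kw =>
        PySem.Chars.startswith line (kw ++ ['(']) ||
        PySem.Chars.startswith line (kw ++ [' ']) || line == kw) then true
    else pvALoop rest

def is_mutation_query (query : String) : Bool :=
  let query_lower := PySem.Chars.strip (PySem.Chars.lower query.toList)
  if PySem.Chars.startswith query_lower "mutation".toList then true
  else if PySem.Chars.startswith query_lower "query".toList then false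
  else pvALoop (PySem.Chars.splitOn query_lower "\n".toList)

-- ===== PORT B =====
-- _MUTATIVE_SET = frozenset(MUTATIVE_KEYWORDS)
def pvMutativeSet : PySem.Set (List Char) := PySem.Set.ofList pvKeywords

-- line.split("(", 1)[0].split(" ", 1)[0]: the prefix before the first '(' then before the
-- first ' ' — exact for a single-character separator as takeWhile of "not that character"
def pvRootToken (line : List Char) : List Char :=
  (line.takeWhile (· ≠ '(')).takeWhile (· ≠ ' ')

-- roots = { root(line) for line in stripped if line and not line.startswith("#") }
def pvRoots (stripped : List (List Char)) : PySem.Set (List Char) :=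
  PySem.Set.ofList
    ((stripped.filter (fun l => !(l == []) && !PySem.Chars.startswith l ['#'])).map pvRootToken)

def is_mutation_query_alt (query : String) : Bool :=
  let q := PySem.Chars.strip (PySem.Chars.lower query.toList)
  if PySem.Chars.startswith q "mutation".toList then true
  else if PySem.Chars.startswith q "query".toList then false
  else
    let stripped := (PySem.Chars.splitOn q "\n".toList).map PySem.Chars.strip
    !(PySem.Set.isdisjoint pvMutativeSet (pvRoots stripped))

-- ===== PRECONDITION & SPEC =====
def Spec_is_mutation_query (query : String) (out : Bool) : Prop := out = is_mutation_query_alt query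
instance (query : String) (out : Bool) : Decidable (Spec_is_mutation_query query out) := by unfold Spec_is_mutation_query; infer_instance

-- ===== CLAIM (what is proved, stated in full; the proofs are below) =====
def Claim_equal_is_mutation_query : Prop := ∀ (query : String), Dom_is_mutation_query query → Spec_is_mutation_query query (is_mutation_query query)

-- ===== LEMMAS AND PROOFS =====

-- for a keyword free of '(' and ' ', A's three startswith/eq tests are exactly "token = keyword"
lemma pv_tok_eq (kw l : List Char) (h : ∀ c ∈ kw, c ≠ '(' ∧ c ≠ ' ') :
    (PySem.Chars.startswith l (kw ++ ['(']) ||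
     PySem.Chars.startswith l (kw ++ [' ']) || l == kw)
    = (pvRootToken l == kw) := by
  induction l generalizing kw with
  | nil =>
    cases kw <;> simp [PySem.Chars.startswith, pvRootToken]
  | cons c l ih =>
    cases kw with
    | nil =>
      by_cases h1 : c = '(' <;> by_cases h2 : c = ' ' <;>
        simp [PySem.Chars.startswith, pvRootToken, List.isPrefixOf, List.takeWhile, h1, h2] <;>
        exact ⟨Ne.symm h1, Ne.symm h2⟩
    | cons k kw' =>
      obtain ⟨hk1, hk2⟩ := h k (by simp)
      have hrest : ∀ c ∈ kw', c ≠ '(' ∧ c ≠ ' ' := fun c hc => h c (by simp [hc])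
      by_cases hc : c = k
      · subst hc
        have := ih kw' hrest
        simp [PySem.Chars.startswith, pvRootToken, List.takeWhile,
              hk1, hk2] at this ⊢
        simpa [PySem.Chars.startswith, pvRootToken] using this
      · have hb1 : (k == c) = false := by simp [Ne.symm hc]
        have hb2 : (c == k) = false := by simp [hc]
        by_cases h1 : c = '(' <;> by_cases h2 : c = ' ' <;>
          simp [PySem.Chars.startswith, pvRootToken, List.isPrefixOf, List.takeWhile,
                h1, h2, hb1, hb2, hk1, hk2] <;>
          (intro e; first | exact absurd e.symm hk1 | exact absurd e.symm hk2)

-- any over a list respects pointwise equality on its members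
lemma pv_any_congr {α : Type} {l : List α} {p q : α → Bool}
    (h : ∀ a ∈ l, p a = q a) : l.any p = l.any q := by
  induction l with
  | nil => rfl
  | cons a l ih =>
    simp only [List.any_cons, h a (by simp), ih fun b hb => h b (by simp [hb])]

-- per line, A's any-over-keywords test equals "this line's root token is a keyword"
lemma pv_line_eq (l : List Char) :
    pvKeywords.any (fun kw =>
        PySem.Chars.startswith l (kw ++ ['(']) ||
        PySem.Chars.startswith l (kw ++ [' ']) || l == kw)
    = pvKeywords.contains (pvRootToken l) := by
  have hk0 : pvKeywords.all (fun kw => kw.all fun c => c != '(' && c != ' ') = true := by rfl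
  have hk : ∀ kw ∈ pvKeywords, ∀ c ∈ kw, c ≠ '(' ∧ c ≠ ' ' := by
    intro kw hkw c hc
    have := List.all_eq_true.mp (List.all_eq_true.mp hk0 kw hkw) c hc
    simpa using this
  rw [pv_any_congr (fun kw hkw => pv_tok_eq kw l (hk kw hkw)), List.any_beq]

-- A's early-return loop computes "some kept line's token is a keyword"
lemma pv_aloop_eq_any (ls : List (List Char)) :
    pvALoop ls =
      (((ls.map PySem.Chars.strip).filter
          (fun l => !(l == []) && !PySem.Chars.startswith l ['#'])).any
        (fun t => pvKeywords.contains (pvRootToken t))) := by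
  induction ls with
  | nil => rfl
  | cons l rest ih =>
    simp only [pvALoop, List.map_cons, List.filter_cons]
    rw [pv_line_eq]
    by_cases h1 : PySem.Chars.startswith (PySem.Chars.strip l) ['#'] = true
    · have hc : (PySem.Chars.startswith (PySem.Chars.strip l) "#".toList || PySem.Chars.strip l == []) = true := by
        simpa using Or.inl h1
      rw [if_pos hc]
      have hk : (!(PySem.Chars.strip l == []) && !PySem.Chars.startswith (PySem.Chars.strip l) ['#']) = false := by
        simp [h1]
      rw [hk]; simp [ih]
    · by_cases h2 : PySem.Chars.strip l = []
      · have hc : (PySem.Chars.startswith (PySem.Chars.strip l) "#".toList || PySem.Chars.strip l == []) = true := by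
          simp [h2]
        rw [if_pos hc]
        have hk : (!(PySem.Chars.strip l == []) && !PySem.Chars.startswith (PySem.Chars.strip l) ['#']) = false := by
          simp [h2]
        rw [hk]; simp [ih]
      · have hc : (PySem.Chars.startswith (PySem.Chars.strip l) "#".toList || PySem.Chars.strip l == []) = false := by
          simp [h2]; simpa using h1
        rw [hc, if_neg (by simp)]
        have hk : (!(PySem.Chars.strip l == []) && !PySem.Chars.startswith (PySem.Chars.strip l) ['#']) = true := by
          simp [h1, h2]
        rw [hk, if_pos rfl, List.any_cons]
        by_cases h3 : pvKeywords.contains (pvRootToken (PySem.Chars.strip l)) = true <;>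
          simp [h3, ih]

-- "some kept line's token is a keyword" is exactly "the keyword set meets the root-token set"
lemma pv_any_eq_not_disjoint (ts : List (List Char)) :
    ((ts.filter (fun l => !(l == []) && !PySem.Chars.startswith l ['#'])).any
        (fun t => pvKeywords.contains (pvRootToken t)))
      = !(PySem.Set.isdisjoint pvMutativeSet (pvRoots ts)) := by
  rw [Bool.eq_iff_iff, Bool.not_eq_true', Bool.eq_false_iff, Ne, PySem.Set.isdisjoint_iff]
  push_neg
  simp only [List.any_eq_true, List.mem_filter, pvRoots, pvMutativeSet,
    PySem.Set.mem_ofList, List.mem_map]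
  constructor
  · rintro ⟨t, ⟨ht, hkeep⟩, hkw⟩
    exact ⟨pvRootToken t, by simpa using hkw, ⟨t, ⟨ht, hkeep⟩, rfl⟩⟩
  · rintro ⟨kw, hkw, ⟨t, ⟨ht, hkeep⟩, rfl⟩⟩
    exact ⟨t, ⟨ht, hkeep⟩, by simpa using hkw⟩

-- ===== VERDICT (by name: the statement is the Claim_ definition above) =====
theorem is_mutation_query_spec : Claim_equal_is_mutation_query := by
  intro query _
  unfold Spec_is_mutation_query is_mutation_query is_mutation_query_alt
  simp only [pv_aloop_eq_any, pv_any_eq_not_disjoint]
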